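-- pv_equiv track=rewrite | github.com/Andrei3223/planning-ai-agent | src/agent/agentkit/tools.py | invert_busy_to_free
-- ===== SOURCE A (Python) =====
-- from typing import List, Dict, Optional, Set
--
-- def invert_busy_to_free(busy_slots: List[List[str]], day_start="08:00", day_end="22:00") -> List[List[str]]:
--     """
--     Given a list of busy [start,end] slots for one day,
--     return free [start,end] slots between day_start and day_end.
--     """
--     # Sort busy slots
--     busy_sorted = sorted(busy_slots, key=lambda x: x[0])
--     free_slots: List[List[str]] = []
--     current_start = day_start
--
--     for s, e in busy_sorted:
--         if s > current_start:
--             free_slots.append([current_start, s])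
--         if e > current_start:
--             current_start = max(current_start, e)
--
--     # Last free interval until day_end
--     if current_start < day_end:
--         free_slots.append([current_start, day_end])
--
--     return free_slots
-- ===== SOURCE B (Python) =====
-- def invert_busy_to_free(busy_slots, day_start="08:00", day_end="22:00"):
--     """
--     Given a list of busy [start,end] slots for one day,
--     return free [start,end] slots between day_start and day_end.
--     """
--     # Pass 1: merge sorted busy slots into disjoint covered blocks.
--     blocks = []
--     for s, e in sorted(busy_slots, key=lambda x: x[0]):
--         if blocks and s <= blocks[-1][1]:
--             blocks[-1][1] = max(blocks[-1][1], e)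
--         else:
--             blocks.append([s, e])
--     # Pass 2: emit the gaps between blocks, starting from day_start.
--     free = []
--     cursor = day_start
--     for bs, be in blocks:
--         if bs > cursor:
--             free.append([cursor, bs])
--         cursor = max(cursor, be)
--     if cursor < day_end:
--         free.append([cursor, day_end])
--     return free
-- ===== Notes on version B (the rewrite author's own statement) =====
-- stated objective: alternative
-- what changed: A's single stateful scan (cursor + emit in one loop over the sorted slots) is replaced by a two-pass decomposition: first merge the sorted busy slots into disjoint covered blocks, then a second pass over the blocks emits the free gaps from a cursor starting at day_start.
import Mathlib
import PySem

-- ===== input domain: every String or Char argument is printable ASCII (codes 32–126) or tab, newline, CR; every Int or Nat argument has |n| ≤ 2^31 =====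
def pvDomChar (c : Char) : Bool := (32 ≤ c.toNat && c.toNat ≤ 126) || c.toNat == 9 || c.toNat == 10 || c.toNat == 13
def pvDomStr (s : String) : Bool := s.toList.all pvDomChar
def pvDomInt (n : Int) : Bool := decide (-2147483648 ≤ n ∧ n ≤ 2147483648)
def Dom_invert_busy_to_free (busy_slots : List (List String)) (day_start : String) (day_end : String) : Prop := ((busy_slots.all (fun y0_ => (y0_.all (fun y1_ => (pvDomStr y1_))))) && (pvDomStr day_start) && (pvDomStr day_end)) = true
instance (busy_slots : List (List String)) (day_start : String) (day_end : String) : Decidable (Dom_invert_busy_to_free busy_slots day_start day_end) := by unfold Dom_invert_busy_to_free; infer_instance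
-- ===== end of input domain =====

-- B replaces A's single stateful scan by a two-pass decomposition (merge busy slots into
-- disjoint covered blocks, then emit the gaps between blocks); same cost, clearer structure.

-- Python max(a, b) on strings (returns a on ties — for a total order the value is the max).
def pvMax (a b : String) : String := if a < b then b else a

-- ===== PORT A =====
-- the loop body of A: state = (free_slots, current_start); a slot not of length 2 makes
-- Python raise (excluded by Pre_), the port leaves the state unchanged there.
def pvAStep (st : List (List String) × String) (slot : List String) : List (List String) × String :=
  match slot with
  | s :: e :: _ =>
      let free := if st.2 < s then st.1 ++ [[st.2, s]] else st.1
      let cur := if st.2 < e then pvMax st.2 e else st.2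
      (free, cur)
  | _ => st

def invert_busy_to_free (busy_slots : List (List String)) (day_start : String) (day_end : String) : List (List String) :=
  let busy_sorted := PySem.List.sorted busy_slots (fun x => PySem.List.pyGetD x 0 "")
  let st := busy_sorted.foldl pvAStep ([], day_start)
  if st.2 < day_end then st.1 ++ [[st.2, day_end]] else st.1

-- ===== PORT B =====
-- pass 1 of B: fold that merges a slot into the block list (extend the last block or append).
def pvMergeStep (blocks : List (String × String)) (slot : List String) : List (String × String) :=
  match slot with
  | s :: e :: _ =>
      match blocks.getLast? with
      | some (bs, be) =>
          if s ≤ be then blocks.dropLast ++ [(bs, pvMax be e)]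
          else blocks ++ [(s, e)]
      | none => blocks ++ [(s, e)]
  | _ => blocks

-- pass 2 of B: walk the blocks with a cursor, appending each gap.
def pvEmit (day_end : String) : List (String × String) → List (List String) → String → List (List String)
  | [], free, cursor => if cursor < day_end then free ++ [[cursor, day_end]] else free
  | (bs, be) :: rest, free, cursor =>
      pvEmit day_end rest (if cursor < bs then free ++ [[cursor, bs]] else free) (pvMax cursor be)

def invert_busy_to_free_alt (busy_slots : List (List String)) (day_start : String) (day_end : String) : List (List String) :=
  let busy_sorted := PySem.List.sorted busy_slots (fun x => PySem.List.pyGetD x 0 "")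
  let blocks := busy_sorted.foldl pvMergeStep []
  pvEmit day_end blocks [] day_start

-- ===== PRECONDITION & SPEC =====
-- Pre_ excludes slots that are not [start, end] pairs: Python's 'for s, e in …' (and the
-- sort key x[0]) raises ValueError/IndexError on them.
def Pre_invert_busy_to_free (busy_slots : List (List String)) (day_start : String) (day_end : String) : Prop :=
  ∀ slot ∈ busy_slots, slot.length = 2
instance (busy_slots : List (List String)) (day_start : String) (day_end : String) : Decidable (Pre_invert_busy_to_free busy_slots day_start day_end) := by unfold Pre_invert_busy_to_free; infer_instance

def pvWitness_invert_busy_to_free : List (List String) × String × String :=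
  ([["09:00", "10:30"], ["10:00", "12:00"]], "08:00", "22:00")

def Spec_invert_busy_to_free (busy_slots : List (List String)) (day_start : String) (day_end : String) (out : List (List String)) : Prop := out = invert_busy_to_free_alt busy_slots day_start day_end
instance (busy_slots : List (List String)) (day_start : String) (day_end : String) (out : List (List String)) : Decidable (Spec_invert_busy_to_free busy_slots day_start day_end out) := by unfold Spec_invert_busy_to_free; infer_instance

-- ===== CLAIM (what is proved, stated in full; the proofs are below) =====
def Claim_equal_invert_busy_to_free : Prop := ∀ (busy_slots : List (List String)) (day_start : String) (day_end : String), Dom_invert_busy_to_free busy_slots day_start day_end → Pre_invert_busy_to_free busy_slots day_start day_end → Spec_invert_busy_to_free busy_slots day_start day_end (invert_busy_to_free busy_slots day_start day_end)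

-- ===== LEMMAS AND PROOFS =====

theorem pvMax_eq_max (a b : String) : pvMax a b = max a b := by
  rcases lt_trichotomy a b with h | h | h
  · rw [pvMax, if_pos h, max_eq_right h.le]
  · subst h; rw [pvMax]; simp
  · rw [pvMax, if_neg (not_lt.2 h.le), max_eq_left h.le]

theorem pvCur_eq (c e : String) : (if c < e then pvMax c e else c) = max c e := by
  by_cases h : c < e
  · rw [if_pos h, pvMax_eq_max]
  · rw [if_neg h, max_eq_left (not_lt.1 h)]

-- accumulator-free form of A's loop (includes A's final day_end step)
def pvAux (day_end : String) : List (List String) → String → List (List String)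
  | [], c => if c < day_end then [[c, day_end]] else []
  | slot :: r, c =>
      match slot with
      | s :: e :: _ => (if c < s then [[c, s]] else []) ++ pvAux day_end r (max c e)
      | _ => pvAux day_end r c

theorem pvAFold (day_end : String) (L : List (List String)) (free : List (List String)) (c : String) :
    (let st := L.foldl pvAStep (free, c);
     if st.2 < day_end then st.1 ++ [[st.2, day_end]] else st.1) = free ++ pvAux day_end L c := by
  induction L generalizing free c with
  | nil =>
      simp only [List.foldl_nil, pvAux]
      split <;> simp
  | cons slot r ih =>
      match slot with
      | s :: e :: rest =>
          simp only [List.foldl_cons, pvAStep, pvAux]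
          rw [ih, pvCur_eq]
          by_cases h : c < s <;> simp [h, List.append_assoc]
      | [] => simpa [pvAStep, pvAux] using ih free c
      | [s] => simpa [pvAStep, pvAux] using ih free c

-- accumulator-free form of B's second pass
def pvEmitR (day_end : String) : List (String × String) → String → List (List String)
  | [], c => if c < day_end then [[c, day_end]] else []
  | (bs, be) :: r, c => (if c < bs then [[c, bs]] else []) ++ pvEmitR day_end r (max c be)

theorem pvEmitFold (day_end : String) (blocks : List (String × String)) (free : List (List String)) (c : String) :
    pvEmit day_end blocks free c = free ++ pvEmitR day_end blocks c := by
  induction blocks generalizing free c with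
  | nil => simp only [pvEmit, pvEmitR]; split <;> simp
  | cons b r ih =>
      obtain ⟨bs, be⟩ := b
      simp only [pvEmit, pvEmitR]
      rw [ih, pvMax_eq_max]
      by_cases h : c < bs <;> simp [h, List.append_assoc]

-- recursive form of B's merge pass, carrying the open block (bs, be)
def pvMergeR (bs be : String) : List (List String) → List (String × String)
  | [] => [(bs, be)]
  | slot :: r =>
      match slot with
      | s :: e :: _ => if s ≤ be then pvMergeR bs (max be e) r else (bs, be) :: pvMergeR s e r
      | _ => pvMergeR bs be r

theorem pvMergeFold (L : List (List String)) (B : List (String × String)) (bs be : String) :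
    L.foldl pvMergeStep (B ++ [(bs, be)]) = B ++ pvMergeR bs be L := by
  induction L generalizing B bs be with
  | nil => simp [pvMergeR]
  | cons slot r ih =>
      match slot with
      | s :: e :: rest =>
          simp only [List.foldl_cons, pvMergeStep, pvMergeR, List.getLast?_concat,
            List.dropLast_concat, pvMax_eq_max]
          by_cases h : s ≤ be
          · simp only [if_pos h]
            exact ih B bs (max be e)
          · simp only [if_neg h, List.append_assoc]
            have := ih (B ++ [(bs, be)]) s e
            simpa [List.append_assoc] using this
      | [] => simpa [pvMergeStep, pvMergeR] using ih B bs be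
      | [s] => simpa [pvMergeStep, pvMergeR] using ih B bs be

-- THE KEY LEMMA: emitting the gaps of the merged blocks equals A's direct scan.
theorem pvKey (day_end : String) (L : List (List String)) (bs be c : String) :
    pvEmitR day_end (pvMergeR bs be L) c
      = (if c < bs then [[c, bs]] else []) ++ pvAux day_end L (max c be) := by
  induction L generalizing bs be c with
  | nil => simp [pvMergeR, pvEmitR, pvAux]
  | cons slot r ih =>
      match slot with
      | s :: e :: rest =>
          simp only [pvMergeR, pvAux]
          by_cases h : s ≤ be
          · simp only [if_pos h]
            rw [ih]
            have hns : ¬ max c be < s :=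
              not_lt.2 (le_trans h (le_max_right c be))
            rw [if_neg hns, max_assoc]
            simp
          · simp only [if_neg h, pvEmitR]
            rw [ih, max_assoc]
      | [] => simpa [pvMergeR, pvAux] using ih bs be c
      | [s] => simpa [pvMergeR, pvAux] using ih bs be c

-- the two programs agree from any starting cursor, for any slot list
theorem pvMain (day_end : String) (L : List (List String)) (c : String) :
    pvEmitR day_end (L.foldl pvMergeStep []) c = pvAux day_end L c := by
  induction L generalizing c with
  | nil => rfl
  | cons slot r ih =>
      match slot with
      | s :: e :: rest =>
          have h0 : pvMergeStep ([] : List (String × String)) (s :: e :: rest) = [] ++ [(s, e)] := by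
            simp [pvMergeStep]
          simp only [List.foldl_cons, h0, List.nil_append]
          rw [show List.foldl pvMergeStep [(s, e)] r = pvMergeR s e r from by
            simpa using pvMergeFold r ([] : List (String × String)) s e]
          rw [pvKey]
          simp only [pvAux]
      | [] => simpa [pvMergeStep, pvAux] using ih c
      | [s] => simpa [pvMergeStep, pvAux] using ih c

-- ===== VERDICT (by name: the statement is the Claim_ definition above) =====
theorem invert_busy_to_free_spec : Claim_equal_invert_busy_to_free := by
  intro busy_slots day_start day_end _hDom _hPre
  unfold Spec_invert_busy_to_free invert_busy_to_free invert_busy_to_free_alt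
  rw [pvEmitFold, pvAFold]
  simp only [List.nil_append]
  rw [pvMain]
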